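-- pv_equiv track=rewrite | github.com/junbangg/Algorithm-Study | 기출/KAKAO 2019 Internship/징검다리건너기/solution.py | check
-- ===== SOURCE A (Python) =====
-- def check(mid, stones, k):
--     left = right = 0
--     for stone in stones:
--         if stone - mid <= 0:
--             right += 1
--         else:
--             right += 1
--             left = right
--         if right - left >= k:
--             return False
--     return True
-- ===== SOURCE B (Python) =====
-- def check(mid, stones, k):
--     # Barrier-index decomposition: collect the indices of stones that stay
--     # above water (stone - mid > 0), bracketed by sentinels -1 and len(stones);
--     # the number of crossable stones strictly between two consecutive barriers
--     # is next - prev - 1, and the crossing fails iff some such gap reaches k.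
--     barriers = [-1]
--     for i, stone in enumerate(stones):
--         if stone - mid > 0:
--             barriers.append(i)
--     barriers.append(len(stones))
--     for prev, nxt in zip(barriers, barriers[1:]):
--         if nxt - prev - 1 >= k:
--             return False
--     return True
-- ===== Notes on version B (the rewrite author's own statement) =====
-- stated objective: alternative
-- what changed: Replaces A's single-pass two-pointer run counter with a staged barrier-index algorithm: first collect the indices of non-submerged stones (with sentinels -1 and len(stones)), then scan consecutive index pairs and fail iff some gap next-prev-1 reaches k.
-- outside the precondition, e.g. on check(0, [], 0): A returns True, B returns False
import Mathlib
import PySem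

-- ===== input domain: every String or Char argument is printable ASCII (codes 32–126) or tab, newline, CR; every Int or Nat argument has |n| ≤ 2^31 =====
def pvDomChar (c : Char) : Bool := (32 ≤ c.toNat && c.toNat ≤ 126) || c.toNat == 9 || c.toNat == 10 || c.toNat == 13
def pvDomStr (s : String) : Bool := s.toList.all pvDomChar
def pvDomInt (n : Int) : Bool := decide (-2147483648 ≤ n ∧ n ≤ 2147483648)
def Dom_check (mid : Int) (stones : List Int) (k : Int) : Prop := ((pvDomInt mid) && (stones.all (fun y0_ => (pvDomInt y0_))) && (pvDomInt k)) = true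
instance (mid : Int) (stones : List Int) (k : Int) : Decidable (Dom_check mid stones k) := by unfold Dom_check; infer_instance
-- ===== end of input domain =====

-- B: staged barrier-index algorithm (collect indices of non-submerged stones with
-- sentinels, then scan consecutive index gaps) instead of A's running two-pointer counter.

-- ===== PORT A =====
-- A's loop with state (left, right); early `return False` modelled by the Bool result.
def checkGoA (mid k : Int) : List Int → Int → Int → Bool
  | [], _, _ => true
  | stone :: rest, left, right =>
      let right' := right + 1
      let left' := if stone - mid ≤ 0 then left else right'
      if right' - left' ≥ k then false else checkGoA mid k rest left' right'

def check (mid : Int) (stones : List Int) (k : Int) : Bool :=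
  checkGoA mid k stones 0 0

-- ===== PORT B =====
-- first loop of Source B: collect the indices i with stones[i] - mid > 0
def barriersGo (mid : Int) : List Int → Int → List Int
  | [], _ => []
  | stone :: rest, i =>
      if stone - mid > 0 then i :: barriersGo mid rest (i + 1)
      else barriersGo mid rest (i + 1)

-- second loop of Source B: scan consecutive pairs, early `return False` on a gap ≥ k
def gapsOk (k : Int) : List Int → Bool
  | [] => true
  | [_] => true
  | a :: b :: rest => if b - a - 1 ≥ k then false else gapsOk k (b :: rest)

def check_alt (mid : Int) (stones : List Int) (k : Int) : Bool :=
  gapsOk k ((-1) :: (barriersGo mid stones 0 ++ [(stones.length : Int)]))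

-- ===== PRECONDITION & SPEC =====
-- Pre_ excludes the degenerate corner of empty stones with k ≤ 0, where A's vacuous True
-- and B's False (the empty gap between the two sentinels is already ≥ k) are both
-- accidental readings of an unspecified corner.
def Pre_check (mid : Int) (stones : List Int) (k : Int) : Prop :=
  ¬ (stones = [] ∧ k ≤ 0)
instance (mid : Int) (stones : List Int) (k : Int) : Decidable (Pre_check mid stones k) := by
  unfold Pre_check; infer_instance

def pvWitness_check : Int × List Int × Int := (1, [2, 0, 1], 2)

def Spec_check (mid : Int) (stones : List Int) (k : Int) (out : Bool) : Prop := out = check_alt mid stones k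
instance (mid : Int) (stones : List Int) (k : Int) (out : Bool) : Decidable (Spec_check mid stones k out) := by unfold Spec_check; infer_instance

-- ===== CLAIM (what is proved, stated in full; the proofs are below) =====
def Claim_equal_check : Prop := ∀ (mid : Int) (stones : List Int) (k : Int), Dom_check mid stones k → Pre_check mid stones k → Spec_check mid stones k (check mid stones k)

-- ===== LEMMAS AND PROOFS =====

-- every collected barrier index is ≥ the starting index
theorem barriersGo_mem_ge (mid : Int) (rest : List Int) (i : Int) :
    ∀ x ∈ barriersGo mid rest i, i ≤ x := by
  induction rest generalizing i with
  | nil => simp [barriersGo]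
  | cons s t ih =>
      intro x hx
      simp only [barriersGo] at hx
      split at hx
      · rcases List.mem_cons.mp hx with rfl | hx
        · exact le_refl _
        · exact le_trans (by omega) (ih (i + 1) x hx)
      · exact le_trans (by omega) (ih (i + 1) x hx)

-- the head of barriersGo mid rest i ++ [i + rest.length] is ≥ i
theorem barriers_head_ge (mid : Int) (rest : List Int) (i : Int) :
    ∃ b l, barriersGo mid rest i ++ [(i + rest.length : Int)] = b :: l ∧ i ≤ b := by
  cases h : barriersGo mid rest i with
  | nil => exact ⟨i + rest.length, [], by simp [h], by omega⟩
  | cons b l =>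
      refine ⟨b, l ++ [(i + rest.length : Int)], by simp [h], ?_⟩
      exact barriersGo_mem_ge mid rest i b (by simp [h])

-- main invariant: while A's loop is alive with state left = prev + 1, right = i
-- (prev = index of the last barrier, -1 initially), A's remainder equals B's gap
-- scan from prev over the remaining barriers, provided the current run i - left < k.
theorem check_main (mid k : Int) (hk : 0 < k) :
    ∀ (rest : List Int) (prev i : Int),
      i - (prev + 1) < k →
      checkGoA mid k rest (prev + 1) i =
        gapsOk k (prev :: (barriersGo mid rest i ++ [(i + rest.length : Int)])) := by
  intro rest
  induction rest with
  | nil =>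
      intro prev i hcur
      simp only [checkGoA, barriersGo, List.nil_append, List.length_nil, gapsOk]
      rw [if_neg (by omega)]
  | cons s t ih =>
      intro prev i hcur
      simp only [checkGoA, barriersGo]
      by_cases hs : s - mid ≤ 0
      · simp only [if_pos hs, if_neg (by omega : ¬ s - mid > 0)]
        by_cases hfire : i + 1 - (prev + 1) ≥ k
        · rw [if_pos hfire]
          -- A dies here; B's first gap is already ≥ k
          obtain ⟨b, l, hb, hge⟩ := barriers_head_ge mid t (i + 1)
          have e : (i + (s :: t).length : Int) = i + 1 + t.length := by
            simp; omega
          rw [e, hb]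
          simp only [gapsOk]
          rw [if_pos (by omega)]
        · rw [if_neg hfire]
          have e : (i + (s :: t).length : Int) = i + 1 + t.length := by
            simp; omega
          rw [e]
          exact ih prev (i + 1) (by omega)
      · simp only [if_neg hs, if_pos (by omega : s - mid > 0)]
        rw [if_neg (by omega : ¬ i + 1 - (i + 1) ≥ k)]
        have e : (i + (s :: t).length : Int) = i + 1 + t.length := by
          simp; omega
        rw [e, List.cons_append]
        simp only [gapsOk]
        rw [if_neg (by omega : ¬ i - prev - 1 ≥ k)]
        have := ih i (i + 1) (by omega)
        rw [show i + 1 = i + 1 by rfl] at this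
        exact this

-- ===== VERDICT (by name: the statement is the Claim_ definition above) =====
theorem check_spec : Claim_equal_check := by
  intro mid stones k _ hpre
  unfold Spec_check check check_alt
  by_cases hk : 0 < k
  · have := check_main mid k hk stones (-1) 0 (by omega)
    simpa using this
  · -- k ≤ 0: Pre_ gives stones ≠ []; both sides are false
    have hne : stones ≠ [] := fun h => hpre ⟨h, by omega⟩
    obtain ⟨s, t, rfl⟩ := List.exists_cons_of_ne_nil hne
    have hA : checkGoA mid k (s :: t) 0 0 = false := by
      simp only [checkGoA]
      split <;> simp_all <;> omega
    rw [hA]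
    -- B: the first gap head - (-1) - 1 = head ≥ 0 ≥ k, so the scan fails at once
    obtain ⟨b, l, hb, hge⟩ := barriers_head_ge mid (s :: t) 0
    rw [show ((0 : Int) + (s :: t).length) = ((s :: t).length : Int) by omega] at hb
    rw [hb]
    simp only [gapsOk]
    rw [if_pos (by omega)]
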